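-- pv_equiv track=rewrite | github.com/stijnbenja/BigData2 | code/functions.py | buy_weeks_to_ago
-- ===== SOURCE A (Python) =====
-- def buy_weeks_to_ago(buy_weeks):
--     weeks_past = 90
--     val = []
--     bought = False
--
--     for i in range(90):
--         if i in buy_weeks:
--             weeks_past = 0
--             val.append(weeks_past)
--             bought = True
--         elif(bought==True):
--             weeks_past += 1
--             val.append(weeks_past)
--         else:
--             val.append(90)
--     return val
-- ===== SOURCE B (Python) =====
-- def buy_weeks_to_ago(buy_weeks):
--     # marker pass: 0 at buy slots, 90 elsewhere
--     val = [0 if i in buy_weeks else 90 for i in range(90)]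
--     # forward fill: distance since the last buy
--     for i in range(1, 90):
--         if val[i] != 0 and val[i - 1] != 90:
--             val[i] = val[i - 1] + 1
--     return val
-- ===== Notes on version B (the rewrite author's own statement) =====
-- stated objective: alternative
-- what changed: Replaces A's single pass with a (weeks_past, bought) accumulator state by a marker array (0 at buy slots, 90 elsewhere) followed by a stateless forward-fill pass that increments the previous cell's value.
import Mathlib
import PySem

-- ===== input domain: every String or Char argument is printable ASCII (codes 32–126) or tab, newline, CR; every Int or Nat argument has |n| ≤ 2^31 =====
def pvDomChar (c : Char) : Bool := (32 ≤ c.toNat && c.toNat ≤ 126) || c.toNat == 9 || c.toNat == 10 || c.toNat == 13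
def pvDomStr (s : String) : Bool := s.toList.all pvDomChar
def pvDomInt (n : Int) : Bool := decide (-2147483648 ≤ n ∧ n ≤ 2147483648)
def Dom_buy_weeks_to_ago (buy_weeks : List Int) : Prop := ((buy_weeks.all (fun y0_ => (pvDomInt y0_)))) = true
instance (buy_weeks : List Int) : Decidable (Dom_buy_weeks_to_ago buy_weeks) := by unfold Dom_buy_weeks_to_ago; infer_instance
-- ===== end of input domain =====

-- B replaces A's accumulator+flag single pass by a marker array plus a stateless forward-fill pass (alternative decomposition, same cost).

-- ===== PORT A =====
-- state: (weeks_past, val, bought), exactly A's three locals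
def buy_weeks_to_ago (buy_weeks : List Int) : List Int :=
  ((PySem.List.pyRange 0 90 1).foldl
    (fun (st : Int × List Int × Bool) i =>
      if buy_weeks.contains i then
        (0, st.2.1 ++ [(0 : Int)], true)
      else if st.2.2 then
        (st.1 + 1, st.2.1 ++ [st.1 + 1], st.2.2)
      else
        (st.1, st.2.1 ++ [(90 : Int)], st.2.2))
    (90, [], false)).2.1

-- ===== PORT B =====
-- val[i] reads/writes: the loop indices 1 ≤ i < 90 are always in range of the
-- 90-element list, so pyGetD _ _ 0 and List.set i.toNat are exact here.
def buy_weeks_to_ago_alt (buy_weeks : List Int) : List Int :=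
  let val := (PySem.List.pyRange 0 90 1).map
    (fun i => if buy_weeks.contains i then (0 : Int) else 90)
  (PySem.List.pyRange 1 90 1).foldl
    (fun v i =>
      if PySem.List.pyGetD v i 0 ≠ 0 ∧ PySem.List.pyGetD v (i - 1) 0 ≠ 90 then
        v.set i.toNat (PySem.List.pyGetD v (i - 1) 0 + 1)
      else v)
    val

-- ===== PRECONDITION & SPEC =====
def Spec_buy_weeks_to_ago (buy_weeks : List Int) (out : List Int) : Prop := out = buy_weeks_to_ago_alt buy_weeks
instance (buy_weeks : List Int) (out : List Int) : Decidable (Spec_buy_weeks_to_ago buy_weeks out) := by unfold Spec_buy_weeks_to_ago; infer_instance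

-- ===== CLAIM (what is proved, stated in full; the proofs are below) =====
def Claim_equal_buy_weeks_to_ago : Prop := ∀ (buy_weeks : List Int), Dom_buy_weeks_to_ago buy_weeks → Spec_buy_weeks_to_ago buy_weeks (buy_weeks_to_ago buy_weeks)

-- ===== LEMMAS AND PROOFS =====

-- the common closed recurrence: weeks since the last buy (90 = never bought yet)
def agoF (c : Int → Bool) : Nat → Int
  | 0 => if c 0 then 0 else 90
  | n + 1 => if c ((n : Int) + 1) then 0 else if agoF c n = 90 then 90 else agoF c n + 1

theorem agoF_bound (c : Int → Bool) (n : Nat) : agoF c n = 90 ∨ agoF c n ≤ n := by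
  induction n with
  | zero =>
    unfold agoF; split_ifs
    · right; norm_num
    · left; rfl
  | succ n ih =>
    simp only [agoF]
    split_ifs with h1 h2
    · right; omega
    · left; rfl
    · right; rcases ih with h | h
      · exact absurd h h2
      · push_cast; omega

-- A's loop invariant
theorem portA_inv (c : List Int) (n : Nat) (hn : n ≤ 89) :
    ((PySem.List.pyRange 0 ((n : Int) + 1) 1).foldl
      (fun (st : Int × List Int × Bool) i =>
        if c.contains i then (0, st.2.1 ++ [(0 : Int)], true)
        else if st.2.2 then (st.1 + 1, st.2.1 ++ [st.1 + 1], st.2.2)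
        else (st.1, st.2.1 ++ [(90 : Int)], st.2.2))
      (90, [], false))
    = (agoF c.contains n, (List.range (n + 1)).map (agoF c.contains),
       decide (agoF c.contains n ≠ 90)) := by
  induction n with
  | zero =>
    rw [show ((0 : Nat) : Int) + 1 = (0 : Int) + 1 by norm_num,
        PySem.List.pyRange_one_singleton]
    by_cases h : (0 : Int) ∈ c <;> simp [agoF, h]
  | succ n ih =>
    rw [show ((n + 1 : Nat) : Int) + 1 = ((n : Int) + 1) + 1 by push_cast; ring,
        PySem.List.pyRange_one_succ_right (by positivity : (0 : Int) ≤ (n : Int) + 1),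
        List.foldl_append, ih (by omega)]
    simp only [List.foldl_cons, List.foldl_nil]
    by_cases h : ((n : Int) + 1) ∈ c
    · simp [agoF, h, List.range_succ]
    · by_cases hA : agoF c.contains n = 90
      · simp [agoF, h, hA, List.range_succ]
      · have hb : agoF c.contains n ≤ (n : Int) := (agoF_bound c.contains n).resolve_left hA
        have h89 : agoF c.contains n + 1 ≠ 90 := by
          have : (n : Int) ≤ 88 := by exact_mod_cast (by omega : n ≤ 88)
          omega
        simp [agoF, h, hA, h89, List.range_succ]

theorem portA_eq (c : List Int) :
    buy_weeks_to_ago c = (List.range 90).map (agoF c.contains) := by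
  have h := portA_inv c 89 (by omega)
  unfold buy_weeks_to_ago
  norm_num at h ⊢
  rw [h]

-- B's initial marker array, as a map over List.range
theorem portB_val (c : List Int) :
    (PySem.List.pyRange 0 90 1).map
        (fun i => if c.contains i then (0 : Int) else 90)
    = (List.range 90).map
        (fun (k : Nat) => if c.contains (k : Int) then (0 : Int) else 90) := by
  rw [show (90 : Int) = ((90 : Nat) : Int) by norm_num, PySem.List.pyRange_zero_nat,
      List.map_map]
  rfl

-- B's loop invariant: after processing i = 1 .. n, the first n+1 slots are final
theorem portB_inv (c : List Int) (n : Nat) (hn : n ≤ 89) :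
    ((PySem.List.pyRange 1 ((n : Int) + 1) 1).foldl
      (fun v i =>
        if PySem.List.pyGetD v i 0 ≠ 0 ∧ PySem.List.pyGetD v (i - 1) 0 ≠ 90 then
          v.set i.toNat (PySem.List.pyGetD v (i - 1) 0 + 1)
        else v)
      ((PySem.List.pyRange 0 90 1).map
        (fun i => if c.contains i then (0 : Int) else 90)))
    = (List.range 90).map
        (fun k => if k < n + 1 then agoF c.contains k
                  else if c.contains (k : Int) then (0 : Int) else 90) := by
  induction n with
  | zero =>
    rw [show ((0 : Nat) : Int) + 1 = (1 : Int) by norm_num,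
        PySem.List.pyRange_one_eq_nil (le_refl (1 : Int)), List.foldl_nil, portB_val]
    refine List.map_congr_left fun k hk => ?_
    by_cases hk0 : k < 1
    · have : k = 0 := by omega
      subst this
      simp [agoF]
    · simp [hk0]
  | succ n ih =>
    rw [show ((n + 1 : Nat) : Int) + 1 = ((n : Int) + 1) + 1 by push_cast; ring,
        PySem.List.pyRange_one_succ_right (by omega : (1 : Int) ≤ (n : Int) + 1),
        List.foldl_append, ih (by omega), List.foldl_cons, List.foldl_nil]
    have hget1 : PySem.List.pyGetD
        ((List.range 90).map
          (fun k => if k < n + 1 then agoF c.contains k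
                    else if c.contains (k : Int) then (0 : Int) else 90)) ((n : Int) + 1) 0
        = (if ((n : Int) + 1) ∈ c then (0 : Int) else 90) := by
      rw [show ((n : Int) + 1) = ((n + 1 : Nat) : Int) by push_cast; ring,
          PySem.List.pyGetD_natCast, List.getD_eq_getElem?_getD,
          List.getElem?_map, List.getElem?_range (by omega : n + 1 < 90)]
      simp
    have hget0 : PySem.List.pyGetD
        ((List.range 90).map
          (fun k => if k < n + 1 then agoF c.contains k
                    else if c.contains (k : Int) then (0 : Int) else 90)) (((n : Int) + 1) - 1) 0
        = agoF c.contains n := by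
      rw [show ((n : Int) + 1) - 1 = ((n : Nat) : Int) by ring,
          PySem.List.pyGetD_natCast, List.getD_eq_getElem?_getD,
          List.getElem?_map, List.getElem?_range (by omega : n < 90)]
      simp
    rw [hget1, hget0]
    by_cases h : ((n : Int) + 1) ∈ c
    · -- buy slot: marker already 0, loop leaves it; agoF (n+1) = 0 there
      rw [if_neg (by simp [h])]
      refine List.map_congr_left fun k hk => ?_
      rcases Nat.lt_trichotomy k (n + 1) with hlt' | heq | hgt
      · simp [hlt', Nat.lt_succ_of_lt hlt']
      · subst heq
        simp [agoF, h, show n + 1 < n + 1 + 1 by omega]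
      · simp [show ¬ (k < n + 1) by omega, show ¬ (k < n + 1 + 1) by omega]
    · by_cases hA : agoF c.contains n = 90
      · -- no buy yet: previous slot still 90, loop leaves the 90 marker
        rw [if_neg (by simp [hA])]
        refine List.map_congr_left fun k hk => ?_
        rcases Nat.lt_trichotomy k (n + 1) with hlt' | heq | hgt
        · simp [hlt', Nat.lt_succ_of_lt hlt']
        · subst heq
          simp [agoF, h, hA, show n + 1 < n + 1 + 1 by omega]
        · simp [show ¬ (k < n + 1) by omega, show ¬ (k < n + 1 + 1) by omega]
      · -- forward fill: slot n+1 becomes agoF n + 1 = agoF (n+1)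
        rw [if_pos ⟨by simp [h], hA⟩]
        rw [show (((n : Int) + 1)).toNat = n + 1 by omega]
        refine List.ext_getElem (by simp) fun j hj1 hj2 => ?_
        rw [List.getElem_set]
        simp only [List.getElem_map, List.getElem_range]
        rcases Nat.lt_trichotomy j (n + 1) with hlt' | heq | hgt
        · simp [show ¬ (n + 1 = j) by omega, hlt', Nat.lt_succ_of_lt hlt']
        · subst heq
          simp [agoF, h, hA, show n + 1 < n + 1 + 1 by omega]
        · simp [show ¬ (n + 1 = j) by omega, show ¬ (j < n + 1) by omega,
                show ¬ (j < n + 1 + 1) by omega]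

theorem portB_eq (c : List Int) :
    buy_weeks_to_ago_alt c = (List.range 90).map (agoF c.contains) := by
  have h := portB_inv c 89 (by omega)
  unfold buy_weeks_to_ago_alt
  norm_num at h ⊢
  rw [h]
  exact List.map_congr_left (fun k hk => by
    simp only [List.mem_range] at hk; simp [hk])

-- ===== VERDICT (by name: the statement is the Claim_ definition above) =====
theorem buy_weeks_to_ago_spec : Claim_equal_buy_weeks_to_ago := by
  intro bw _
  unfold Spec_buy_weeks_to_ago
  rw [portA_eq, portB_eq]
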